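-- pv_equiv track=rewrite | github.com/MarkParker5/STARK | stark/tools/strtools.py | endswith_startof
-- ===== SOURCE A (Python) =====
-- def endswith_startof(s1: str, s2: str) -> str:
--     i, j = 0, 0
--     n1, n2 = len(s1), len(s2)
--
--     while i < n1:
--         j = 0
--         temp = ""
--         while j < n2 and i + j < n1:
--             if s1[i + j] != s2[j]:
--                 break
--             temp += s1[i + j]
--             j += 1
--
--         if j == n2:
--             return s2
--
--         if j > 0 and i + j == n1:
--             return temp
--
--         i += 1
--
--     return ""
-- ===== SOURCE B (Python) =====
-- def endswith_startof(s1: str, s2: str) -> str: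
--     # If s2 occurs inside s1, answer is s2; otherwise return the longest
--     # (nonempty) suffix of s1 that is a prefix of s2, scanning lengths downward.
--     if s2 in s1:
--         return s2
--     n1 = len(s1)
--     for L in range(min(n1, len(s2)), 0, -1):
--         suf = s1[n1 - L:]
--         if s2.startswith(suf):
--             return suf
--     return ""
-- ===== Notes on version B (the rewrite author's own statement) =====
-- stated objective: simpler
-- what changed: A rescans s2 character-by-character at every start position of s1 with an inner while loop; B instead does a single substring membership test (s2 in s1) and, failing that, one descending loop over suffix lengths testing s2.startswith(s1[n1-L:]), returning the first (longest) matching suffix.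
import Mathlib
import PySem

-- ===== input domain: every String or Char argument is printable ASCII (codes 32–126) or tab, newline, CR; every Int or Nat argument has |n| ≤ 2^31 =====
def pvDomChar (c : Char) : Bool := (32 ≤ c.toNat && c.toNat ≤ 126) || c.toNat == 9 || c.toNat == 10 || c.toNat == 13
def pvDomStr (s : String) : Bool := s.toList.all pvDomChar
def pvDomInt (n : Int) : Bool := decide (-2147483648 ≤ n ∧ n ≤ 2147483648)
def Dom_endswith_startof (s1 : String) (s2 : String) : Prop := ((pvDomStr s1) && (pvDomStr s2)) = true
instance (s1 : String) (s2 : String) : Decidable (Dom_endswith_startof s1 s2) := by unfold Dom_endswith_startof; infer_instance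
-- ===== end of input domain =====

-- B replaces A's quadratic position-by-position rescanning with a substring test
-- plus one descending scan over suffix lengths (objective: simpler).

-- ===== PORT A =====
-- inner while loop: while j < n2 and i + j < n1: …  (returns final (j, temp))
def innerA (c1 c2 : List Char) (i : Nat) (j : Nat) (temp : List Char) : Nat × List Char :=
  if j < c2.length ∧ i + j < c1.length then
    if c1[i+j]? ≠ c2[j]? then (j, temp)
    else innerA c1 c2 i (j+1) (temp ++ [(c1[i+j]?).getD ' '])
  else (j, temp)
termination_by c2.length - j
decreasing_by omega

-- outer while loop: while i < n1: …
def outerA (c1 c2 : List Char) (i : Nat) : List Char :=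
  if i < c1.length then
    let r := innerA c1 c2 i 0 []
    if r.1 = c2.length then c2
    else if 0 < r.1 ∧ i + r.1 = c1.length then r.2
    else outerA c1 c2 (i+1)
  else []
termination_by c1.length - i
decreasing_by omega

def endswith_startof (s1 : String) (s2 : String) : String :=
  String.ofList (outerA s1.toList s2.toList 0)

-- ===== PORT B =====
-- for L in range(min(n1, n2), 0, -1): if s2.startswith(s1[n1-L:]): return s1[n1-L:]
def bLoop (c1 c2 : List Char) : Nat → List Char
  | 0 => []
  | L+1 =>
    if (c1.drop (c1.length - (L+1))).isPrefixOf c2 then c1.drop (c1.length - (L+1))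
    else bLoop c1 c2 L

def endswith_startof_alt (s1 : String) (s2 : String) : String :=
  if s2.toList <:+: s1.toList then s2
  else String.ofList (bLoop s1.toList s2.toList (min s1.toList.length s2.toList.length))

-- ===== PRECONDITION & SPEC =====
def Spec_endswith_startof (s1 : String) (s2 : String) (out : String) : Prop := out = endswith_startof_alt s1 s2
instance (s1 : String) (s2 : String) (out : String) : Decidable (Spec_endswith_startof s1 s2 out) := by unfold Spec_endswith_startof; infer_instance

-- ===== CLAIM (what is proved, stated in full; the proofs are below) =====
def Claim_equal_endswith_startof : Prop := ∀ (s1 : String) (s2 : String), Dom_endswith_startof s1 s2 → Spec_endswith_startof s1 s2 (endswith_startof s1 s2)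

-- ===== LEMMAS AND PROOFS =====

-- longest common prefix of two lists
def cp : List Char → List Char → List Char
  | a :: as, b :: bs => if a = b then a :: cp as bs else []
  | _, _ => []

theorem cp_prefix_left : ∀ (a b : List Char), cp a b <+: a := by
  intro a
  induction a with
  | nil => intro b; cases b <;> simp [cp]
  | cons x xs ih =>
    intro b
    cases b with
    | nil => simp [cp]
    | cons y ys =>
      simp only [cp]
      split
      · next h => subst h; exact List.cons_prefix_cons.mpr ⟨rfl, ih ys⟩
      · simp

theorem cp_prefix_right : ∀ (a b : List Char), cp a b <+: b := by
  intro a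
  induction a with
  | nil => intro b; cases b <;> simp [cp]
  | cons x xs ih =>
    intro b
    cases b with
    | nil => simp [cp]
    | cons y ys =>
      simp only [cp]
      split
      · next h => subst h; exact List.cons_prefix_cons.mpr ⟨rfl, ih ys⟩
      · simp

theorem cp_eq_left_of_prefix : ∀ (a b : List Char), a <+: b → cp a b = a := by
  intro a
  induction a with
  | nil => intro b _; cases b <;> simp [cp]
  | cons x xs ih =>
    intro b h
    cases b with
    | nil => simp at h
    | cons y ys =>
      rw [List.cons_prefix_cons] at h
      obtain ⟨rfl, h2⟩ := h
      simp [cp, ih ys h2]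

theorem cp_eq_right_of_prefix : ∀ (a b : List Char), b <+: a → cp a b = b := by
  intro a
  induction a with
  | nil => intro b h; rw [List.prefix_nil.mp h]; simp [cp]
  | cons x xs ih =>
    intro b h
    cases b with
    | nil => simp [cp]
    | cons y ys =>
      rw [List.cons_prefix_cons] at h
      obtain ⟨rfl, h2⟩ := h
      simp [cp, ih ys h2]

-- the inner loop computes the longest common prefix of c1.drop (i+j) and c2.drop j
theorem innerA_eq_cp (c1 c2 : List Char) (i : Nat) :
    ∀ (y : List Char) (j : Nat) (temp : List Char), c2.drop j = y →
      innerA c1 c2 i j temp =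
        (j + (cp (c1.drop (i+j)) y).length, temp ++ cp (c1.drop (i+j)) y) := by
  intro y
  induction y with
  | nil =>
    intro j temp hy
    have hj : c2.length ≤ j := List.drop_eq_nil_iff.mp hy
    rw [innerA]
    rw [if_neg (by omega)]
    cases h1 : c1.drop (i+j) <;> simp [cp]
  | cons b bs ih =>
    intro j temp hy
    have hj : j < c2.length := by
      by_contra h
      rw [List.drop_eq_nil_of_le (by omega)] at hy
      exact absurd hy (by simp)
    have hc2j : c2[j]? = some b := by
      have : (c2.drop j)[0]? = some b := by rw [hy]; rfl
      rw [List.getElem?_drop] at this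
      simpa using this
    have hbs : c2.drop (j+1) = bs := by
      have : (c2.drop j).drop 1 = c2.drop (j+1) := by
        rw [List.drop_drop]
      rw [hy] at this
      simpa using this.symm
    rw [innerA]
    by_cases hi : i + j < c1.length
    · rw [if_pos ⟨hj, hi⟩]
      obtain ⟨a, as, hd⟩ : ∃ a as, c1.drop (i+j) = a :: as := by
        cases h : c1.drop (i+j) with
        | nil => exact absurd (List.drop_eq_nil_iff.mp h) (by omega)
        | cons a as => exact ⟨a, as, rfl⟩
      have hc1 : c1[i+j]? = some a := by
        have : (c1.drop (i+j))[0]? = some a := by rw [hd]; rfl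
        rw [List.getElem?_drop] at this
        simpa using this
      have has : c1.drop (i+j+1) = as := by
        have : (c1.drop (i+j)).drop 1 = c1.drop (i+j+1) := by rw [List.drop_drop]
        rw [hd] at this
        simpa using this.symm
      by_cases hab : a = b
      · subst hab
        rw [if_neg (by simp [hc1, hc2j])]
        have := ih (j+1) (temp ++ [(c1[i+j]?).getD ' ']) hbs
        rw [show i + (j+1) = i + j + 1 by omega, has] at this
        rw [this, hd]
        simp [cp, hc1]
        omega
      · rw [if_pos (by simp [hc1, hc2j, hab])]
        rw [hd]
        simp [cp, hab]
    · rw [if_neg (by omega)]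
      rw [List.drop_eq_nil_of_le (by omega)]
      simp [cp]

theorem innerA_spec (c1 c2 : List Char) (i : Nat) :
    innerA c1 c2 i 0 [] = ((cp (c1.drop i) c2).length, cp (c1.drop i) c2) := by
  have := innerA_eq_cp c1 c2 i c2 0 [] (by simp)
  simpa using this

-- branch conditions of the outer loop, in terms of prefixes
theorem branch1_iff (c1 c2 : List Char) (i : Nat) :
    (cp (c1.drop i) c2).length = c2.length ↔ c2 <+: c1.drop i := by
  constructor
  · intro h
    have := (cp_prefix_right (c1.drop i) c2).eq_of_length h
    rw [← this]
    exact cp_prefix_left _ _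
  · intro h
    rw [cp_eq_right_of_prefix _ _ h]

theorem branch2_iff (c1 c2 : List Char) (i : Nat) (hi : i < c1.length) :
    (0 < (cp (c1.drop i) c2).length ∧ i + (cp (c1.drop i) c2).length = c1.length) ↔
    (c1.drop i ≠ [] ∧ c1.drop i <+: c2 ∧ cp (c1.drop i) c2 = c1.drop i) := by
  constructor
  · intro ⟨h1, h2⟩
    have hlen : (c1.drop i).length = c1.length - i := List.length_drop ..
    have heq : cp (c1.drop i) c2 = c1.drop i :=
      (cp_prefix_left (c1.drop i) c2).eq_of_length (by omega)
    refine ⟨?_, ?_, heq⟩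
    · intro hnil; rw [hnil] at heq h1; rw [heq] at h1; simp at h1
    · rw [← heq]; exact cp_prefix_right _ _
  · intro ⟨h1, h2, h3⟩
    have hlen : (c1.drop i).length = c1.length - i := List.length_drop ..
    rw [h3]
    constructor
    · cases h : c1.drop i with
      | nil => exact absurd h h1
      | cons a as => simp
    · omega

-- case 1: c2 occurs in c1 → A returns c2 (from any position i left of an occurrence)
theorem outerA_of_infix (c1 c2 : List Char) :
    ∀ i, (∃ k, i ≤ k ∧ c2 <+: c1.drop k) → outerA c1 c2 i = c2 := by
  intro i
  induction hni : c1.length - i using Nat.strong_induction_on generalizing i with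
  | _ n ih =>
  intro ⟨k, hik, hk⟩
  rw [outerA]
  by_cases hi : i < c1.length
  · rw [if_pos hi]
    simp only [innerA_spec]
    by_cases hb1 : (cp (c1.drop i) c2).length = c2.length
    · rw [if_pos hb1]
    · rw [if_neg hb1]
      have hfull : ¬ c2 <+: c1.drop i := fun h => hb1 ((branch1_iff c1 c2 i).mpr h)
      have hki : i < k := by
        rcases Nat.lt_or_ge i k with h | h
        · exact h
        · exfalso
          have hki' : k = i := Nat.le_antisymm h hik
          exact hfull (hki' ▸ hk)
      by_cases hb2 : 0 < (cp (c1.drop i) c2).length ∧ i + (cp (c1.drop i) c2).length = c1.length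
      · -- a partial match ending at the end of c1 would contradict the later full match
        exfalso
        obtain ⟨hne, hpre, hcpeq⟩ := (branch2_iff c1 c2 i hi).mp hb2
        have hlen2 : c2.length ≤ (c1.drop k).length := hk.length_le
        have hlenk : (c1.drop k).length = c1.length - k := List.length_drop ..
        have hleni : (c1.drop i).length = c1.length - i := List.length_drop ..
        have hpl : (c1.drop i).length ≤ c2.length := hpre.length_le
        -- c2.length ≤ n1 - k < n1 - i ≤ c2.length
        omega
      · rw [if_neg hb2]
        exact ih (c1.length - (i+1)) (by omega) (i+1) rfl ⟨k, by omega, hk⟩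
  · -- i ≥ n1: then c1.drop k = [], so c2 = []
    rw [if_neg hi]
    have : c1.drop k = [] := List.drop_eq_nil_of_le (by omega)
    rw [this] at hk
    exact (List.prefix_nil.mp hk).symm

-- case 2: c2 does not occur in c1 → A from position i equals B's loop at length min (n1-i) n2
theorem outerA_of_not_infix (c1 c2 : List Char) (hninf : ¬ c2 <:+: c1) :
    ∀ i, outerA c1 c2 i = bLoop c1 c2 (min (c1.length - i) c2.length) := by
  intro i
  induction hni : c1.length - i using Nat.strong_induction_on generalizing i with
  | _ n ih =>
  subst hni
  rw [outerA]
  by_cases hi : i < c1.length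
  · rw [if_pos hi]
    simp only [innerA_spec]
    have hfull : ¬ c2 <+: c1.drop i := by
      intro h
      exact hninf (h.isInfix.trans (List.drop_suffix i c1).isInfix)
    have hb1 : ¬ (cp (c1.drop i) c2).length = c2.length :=
      fun h => hfull ((branch1_iff c1 c2 i).mp h)
    rw [if_neg hb1]
    have hleni : (c1.drop i).length = c1.length - i := List.length_drop ..
    by_cases hcase : c1.length - i ≤ c2.length
    · -- B's loop at L = n1 - i tests exactly the suffix c1.drop i
      have hL : min (c1.length - i) c2.length = c1.length - i := by omega
      rw [hL]
      obtain ⟨L, hLs⟩ : ∃ L, c1.length - i = L + 1 := ⟨c1.length - i - 1, by omega⟩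
      rw [hLs, bLoop]
      have hback : c1.length - (L+1) = i := by omega
      rw [hback]
      by_cases hpre : c1.drop i <+: c2
      · rw [if_pos (List.isPrefixOf_iff_prefix.mpr hpre)]
        have hcpeq : cp (c1.drop i) c2 = c1.drop i := cp_eq_left_of_prefix _ _ hpre
        have hb2 : 0 < (cp (c1.drop i) c2).length ∧ i + (cp (c1.drop i) c2).length = c1.length :=
          (branch2_iff c1 c2 i hi).mpr ⟨by
            intro h; rw [List.drop_eq_nil_iff] at h; omega, hpre, hcpeq⟩
        rw [if_pos hb2, hcpeq]
      · rw [if_neg (fun h => hpre (List.isPrefixOf_iff_prefix.mp h))]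
        have hb2 : ¬ (0 < (cp (c1.drop i) c2).length ∧ i + (cp (c1.drop i) c2).length = c1.length) := by
          intro h
          exact hpre ((branch2_iff c1 c2 i hi).mp h).2.1
        rw [if_neg hb2]
        rw [ih (c1.length - (i+1)) (by omega) (i+1) rfl]
        congr 1
        omega
    · -- suffix longer than c2: neither branch can fire, and B's bound is still c2.length
      have hb2 : ¬ (0 < (cp (c1.drop i) c2).length ∧ i + (cp (c1.drop i) c2).length = c1.length) := by
        intro h
        have := ((branch2_iff c1 c2 i hi).mp h).2.1.length_le
        omega
      rw [if_neg hb2]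
      rw [ih (c1.length - (i+1)) (by omega) (i+1) rfl]
      congr 1
      omega
  · rw [if_neg hi]
    have : min (c1.length - i) c2.length = 0 := by omega
    rw [this, bLoop]

-- ===== VERDICT (by name: the statement is the Claim_ definition above) =====
theorem endswith_startof_spec : Claim_equal_endswith_startof := by
  intro s1 s2 _
  unfold Spec_endswith_startof endswith_startof endswith_startof_alt
  by_cases hinf : s2.toList <:+: s1.toList
  · rw [if_pos hinf]
    have : ∃ k, 0 ≤ k ∧ s2.toList <+: s1.toList.drop k := by
      obtain ⟨s, t, h⟩ := hinf
      refine ⟨s.length, Nat.zero_le _, ?_⟩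
      rw [← h, List.append_assoc, List.drop_left]
      exact ⟨t, rfl⟩
    rw [outerA_of_infix s1.toList s2.toList 0 this]
    exact String.ofList_toList
  · rw [if_neg hinf]
    rw [outerA_of_not_infix s1.toList s2.toList hinf 0]
    simp only [Nat.sub_zero]
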